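-- pv_equiv track=rewrite | github.com/crimeacs/kaufmannGPT | src/joke_generator/realtime_generator.py | _sanitize_planned_text
-- ===== SOURCE A (Python) =====
-- def _sanitize_planned_text(text: str) -> str:
--     """Normalize the planned joke: strip fillers, enforce two sentences max."""
--     if not text:
--         return text
--     t = text.strip()
--     # Remove common leading fillers
--     fillers = ("Alright, ", "Okay, ", "Well, ", "So, ", "Look, ", "I see, ", "Let's ")
--     for f in fillers:
--         if t.startswith(f):
--             t = t[len(f):].lstrip()
--     # Enforce max two sentences
--     flat = t.replace('\n', ' ').replace('  ', ' ')
--     # Split on period/question/exclamation while keeping delimiters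
--     sentences = []
--     current = ''
--     for ch in flat:
--         current += ch
--         if ch in '.!?':
--             s = current.strip()
--             if s:
--                 sentences.append(s)
--             current = ''
--     if current.strip():
--         sentences.append(current.strip())
--     out = ' '.join(sentences[:2]).strip()
--     # Ensure ending punctuation
--     if out and out[-1] not in '.!?':
--         out += '.'
--     return out
-- ===== SOURCE B (Python) =====
-- def _sanitize_planned_text(text: str) -> str:
--     """Normalize the planned joke: strip fillers, enforce two sentences max."""
--     if not text:
--         return text
--     t = text.strip()
--     fillers = ("Alright, ", "Okay, ", "Well, ", "So, ", "Look, ", "I see, ", "Let's ")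
--     for f in fillers:
--         if t.startswith(f):
--             t = t[len(f):].lstrip()
--     flat = t.replace('\n', ' ').replace('  ', ' ')
--     # Cut the text into delimiter-terminated chunks by repeated slicing
--     # instead of a char-by-char accumulator.
--     sentences = []
--     rest = flat
--     while rest:
--         cut = next((i + 1 for i, ch in enumerate(rest) if ch in '.!?'), len(rest))
--         piece = rest[:cut].strip()
--         if piece:
--             sentences.append(piece)
--         rest = rest[cut:]
--     out = ' '.join(sentences[:2]).strip()
--     if out and out[-1] not in '.!?':
--         out += '.'
--     return out
-- ===== Notes on version B (the rewrite author's own statement) =====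
-- stated objective: alternative
-- what changed: The char-by-char accumulator loop that builds each sentence is replaced by a while loop that repeatedly finds the first delimiter and slices the chunk off the remaining text; the empty guard, strip, filler stripping, flattening and final punctuation step are unchanged.
import Mathlib
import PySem

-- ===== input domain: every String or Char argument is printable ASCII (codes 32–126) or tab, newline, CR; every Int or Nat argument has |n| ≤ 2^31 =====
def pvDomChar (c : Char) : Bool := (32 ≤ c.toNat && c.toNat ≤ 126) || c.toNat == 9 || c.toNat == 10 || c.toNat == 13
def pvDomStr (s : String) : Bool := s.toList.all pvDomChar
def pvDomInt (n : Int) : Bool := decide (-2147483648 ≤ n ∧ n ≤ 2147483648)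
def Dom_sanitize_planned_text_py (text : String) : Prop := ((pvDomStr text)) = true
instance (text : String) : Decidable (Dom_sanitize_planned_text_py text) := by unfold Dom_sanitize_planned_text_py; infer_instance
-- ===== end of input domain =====

-- B replaces A's char-by-char accumulator loop with repeated find-first-delimiter-and-slice;
-- objective: alternative decomposition (same prefix/suffix handling, different sentence splitting).

-- Shared literal constants of both Python sources
def pvDelims : List Char := ['.', '!', '?']
def pvFillers : List String := ["Alright, ", "Okay, ", "Well, ", "So, ", "Look, ", "I see, ", "Let's "]

-- ===== PORT A =====
-- for f in fillers: if t.startswith(f): t = t[len(f):].lstrip()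
def pvStripFillers (t : String) : String :=
  pvFillers.foldl
    (fun t f =>
      if PySem.Str.startswith t f then
        PySem.Str.lstrip (PySem.Str.slice t (some (PySem.Str.len f : Int)) none)
      else t) t

-- the 'for ch in flat' accumulator loop of A (the trailing 'if current.strip()' append is the base case)
def pvLoopA : List Char → List (List Char) → List Char → List (List Char)
  | [], ss, cur =>
      if PySem.Chars.strip cur ≠ [] then ss ++ [PySem.Chars.strip cur] else ss
  | ch :: restc, ss, cur =>
      let cur' := cur ++ [ch]
      if pvDelims.contains ch then
        let s := PySem.Chars.strip cur'
        pvLoopA restc (if s ≠ [] then ss ++ [s] else ss) []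
      else
        pvLoopA restc ss cur'

-- out = ' '.join(sentences[:2]).strip(); if out and out[-1] not in '.!?': out += '.'
def pvFinish (sentences : List (List Char)) : String :=
  let out := PySem.Chars.strip (PySem.Chars.join [' '] (PySem.List.slice sentences none (some 2)))
  let out :=
    if out ≠ [] ∧ (PySem.List.pyGet? out (-1)).any (fun c => !pvDelims.contains c) then
      out ++ ['.']
    else out
  String.ofList out

def sanitize_planned_text_py (text : String) : String :=
  if text = "" then text
  else
    let t := PySem.Str.strip text
    let t := pvStripFillers t
    let flat := PySem.Str.replace (PySem.Str.replace t "\n" " ") "  " " "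
    pvFinish (pvLoopA flat.toList [] [])

-- ===== PORT B =====
-- cut = next((i + 1 for i, ch in enumerate(rest) if ch in '.!?'), len(rest))
def pvFirstCut (restc : List Char) : Nat :=
  match restc.findIdx? (fun ch => pvDelims.contains ch) with
  | some i => i + 1
  | none => restc.length

theorem pvFirstCut_pos (restc : List Char) (h : restc ≠ []) : 1 ≤ pvFirstCut restc := by
  unfold pvFirstCut
  rcases hf : restc.findIdx? (fun ch => pvDelims.contains ch) with _ | i
  · simp
    exact List.length_pos_of_ne_nil h
  · simp

-- the 'while rest:' loop of B: slice off the chunk up to the first delimiter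
def pvLoopB (restc : List Char) (ss : List (List Char)) : List (List Char) :=
  if _h : restc = [] then ss
  else
    let c := pvFirstCut restc
    let piece := PySem.Chars.strip (PySem.List.slice restc none (some (c : Int)))
    pvLoopB (PySem.List.slice restc (some (c : Int)) none)
      (if piece ≠ [] then ss ++ [piece] else ss)
termination_by restc.length
decreasing_by
  simp only [PySem.List.slice_from_natCast, List.length_drop]
  have h1 := pvFirstCut_pos restc _h
  have h2 : restc.length ≠ 0 := by simpa using _h
  omega

def sanitize_planned_text_py_alt (text : String) : String :=
  if text = "" then text
  else
    let t := PySem.Str.strip text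
    let t := pvStripFillers t
    let flat := PySem.Str.replace (PySem.Str.replace t "\n" " ") "  " " "
    pvFinish (pvLoopB flat.toList [])

-- ===== PRECONDITION & SPEC =====
def Spec_sanitize_planned_text_py (text : String) (out : String) : Prop := out = sanitize_planned_text_py_alt text
instance (text : String) (out : String) : Decidable (Spec_sanitize_planned_text_py text out) := by unfold Spec_sanitize_planned_text_py; infer_instance

-- ===== CLAIM (what is proved, stated in full; the proofs are below) =====
def Claim_equal_sanitize_planned_text_py : Prop := ∀ (text : String), Dom_sanitize_planned_text_py text → Spec_sanitize_planned_text_py text (sanitize_planned_text_py text)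

-- ===== LEMMAS AND PROOFS =====

-- A's loop over a delimiter-free prefix just accumulates it into `cur`
theorem pvLoopA_free (pre : List Char) :
    ∀ (rest : List Char) (ss : List (List Char)) (cur : List Char),
      (∀ c ∈ pre, pvDelims.contains c = false) →
      pvLoopA (pre ++ rest) ss cur = pvLoopA rest ss (cur ++ pre) := by
  induction pre with
  | nil => intro rest ss cur _; simp
  | cons ch pre ih =>
      intro rest ss cur hfree
      have hch : pvDelims.contains ch = false := hfree ch (by simp)
      show pvLoopA (ch :: (pre ++ rest)) ss cur = _
      rw [pvLoopA]
      simp only [hch, Bool.false_eq_true, if_false]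
      rw [ih rest ss (cur ++ [ch]) (fun c hc => hfree c (by simp [hc]))]
      simp

-- the two loops agree (strong induction on the length of the remaining text)
theorem pvLoop_eq_aux : ∀ (n : Nat) (restc : List Char) (ss : List (List Char)),
    restc.length ≤ n → pvLoopA restc ss [] = pvLoopB restc ss := by
  intro n
  induction n with
  | zero =>
      intro restc ss hle
      have : restc = [] := by
        cases restc with
        | nil => rfl
        | cons a l => simp at hle
      subst this
      rw [pvLoopB]
      simp [pvLoopA]
      decide
  | succ n ih =>
      intro restc ss hle
      by_cases h : restc = []
      · subst h
        rw [pvLoopB]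
        simp [pvLoopA]
        decide
      · conv_rhs => rw [pvLoopB]
        simp only [dif_neg h]
        cases hf : restc.findIdx? (fun ch => pvDelims.contains ch) with
        | none =>
            have hfree : ∀ x ∈ restc, pvDelims.contains x = false :=
              List.findIdx?_eq_none_iff.mp hf
            have hc : pvFirstCut restc = restc.length := by unfold pvFirstCut; rw [hf]
            have h1 : pvLoopA restc ss ([] : List Char) = pvLoopA [] ss restc := by
              have := pvLoopA_free restc [] ss [] hfree
              simpa using this
            rw [h1]
            simp [pvLoopA, hc, PySem.List.slice_to_natCast, PySem.List.slice_from_natCast,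
              pvLoopB]
        | some i =>
            obtain ⟨hi, hpi, hmin⟩ := List.findIdx?_eq_some_iff_getElem.mp hf
            have hc : pvFirstCut restc = i + 1 := by unfold pvFirstCut; rw [hf]
            have hfree : ∀ x ∈ restc.take i, pvDelims.contains x = false := by
              intro x hx
              obtain ⟨j, hj, rfl⟩ := List.getElem_of_mem hx
              have hj' : j < i := by
                have := hj; simp [List.length_take] at this; omega
              have hjx : (restc.take i)[j] = restc[j] := by simp [List.getElem_take]
              rw [hjx]
              exact Bool.eq_false_iff.mpr (hmin j hj')
            have hsplit : restc = restc.take i ++ (restc[i] :: restc.drop (i + 1)) := by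
              rw [List.getElem_cons_drop hi, List.take_append_drop]
            have h1 : pvLoopA restc ss ([] : List Char)
                = pvLoopA (restc[i] :: restc.drop (i + 1)) ss (restc.take i) := by
              conv_lhs => rw [hsplit]
              have := pvLoopA_free (restc.take i) (restc[i] :: restc.drop (i + 1)) ss [] hfree
              simpa using this
            rw [h1, pvLoopA]
            simp only [hpi, if_true]
            have htake : restc.take i ++ [restc[i]] = restc.take (i + 1) := by
              rw [List.take_add_one]
              simp [List.getElem?_eq_getElem hi]
            have hih := ih (restc.drop (i + 1))
              (if PySem.Chars.strip (restc.take (i + 1)) ≠ [] then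
                ss ++ [PySem.Chars.strip (restc.take (i + 1))] else ss)
              (by simp [List.length_drop]; omega)
            rw [htake, hih]
            simp only [hc, PySem.List.slice_to_natCast, PySem.List.slice_from_natCast]

theorem pvLoop_eq (restc : List Char) (ss : List (List Char)) :
    pvLoopA restc ss [] = pvLoopB restc ss :=
  pvLoop_eq_aux restc.length restc ss le_rfl

-- ===== VERDICT (by name: the statement is the Claim_ definition above) =====
theorem sanitize_planned_text_py_spec : Claim_equal_sanitize_planned_text_py := by
  intro text _
  unfold Spec_sanitize_planned_text_py sanitize_planned_text_py sanitize_planned_text_py_alt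
  by_cases h : text = "" <;> simp [h, pvLoop_eq]
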